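-- pv_equiv track=rewrite | github.com/Dmoore628/Consultation-App-V2 | consulting_firm/validation_engine.py | _check_industry_standards
-- ===== SOURCE A (Python) =====
-- def _check_industry_standards(text: str):
--     known = [
--         'OWASP', 'ASVS', 'ISO 27001', 'SOC 2', 'SOC2', 'GDPR', 'HIPAA', 'PCI', 'PCI-DSS', 'NIST', 'CIS',
--     ]
--     present = []
--     for k in known:
--         if k.lower() in text.lower():
--             present.append(k)
--     # Recommend some that are commonly expected if none of that class is present
--     recommendations = []
--     if not any(s in present for s in ['OWASP', 'ASVS']):
--         recommendations.append('OWASP ASVS')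
--     if not any(s in present for s in ['ISO 27001', 'SOC 2', 'SOC2']):
--         recommendations.append('ISO 27001 or SOC 2')
--     if not any(s in present for s in ['GDPR', 'HIPAA', 'PCI', 'PCI-DSS']):
--         recommendations.append('GDPR/HIPAA/PCI (as applicable)')
--     if not any(s in present for s in ['NIST', 'CIS']):
--         recommendations.append('NIST or CIS Benchmarks')
--     return sorted(set(present)), recommendations
-- ===== SOURCE B (Python) =====
-- def _check_industry_standards(text: str):
--     # Multi-pattern positional scan: walk the text once, at each position record which
--     # keywords start there; recommendations come from groups with no found member.
--     groups = [
--         (['OWASP', 'ASVS'], 'OWASP ASVS'),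
--         (['ISO 27001', 'SOC 2', 'SOC2'], 'ISO 27001 or SOC 2'),
--         (['GDPR', 'HIPAA', 'PCI', 'PCI-DSS'], 'GDPR/HIPAA/PCI (as applicable)'),
--         (['NIST', 'CIS'], 'NIST or CIS Benchmarks'),
--     ]
--     pats = [(k.lower(), k) for members, _ in groups for k in members]
--     t = text.lower()
--     found = set()
--     for i in range(len(t)):
--         for low, orig in pats:
--             if orig not in found and t.startswith(low, i):
--                 found.add(orig)
--     recs = [rec for members, rec in groups if not (found & set(members))]
--     return sorted(found), recs
-- ===== Notes on version B (the rewrite author's own statement) =====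
-- stated objective: alternative
-- what changed: Replaced the per-keyword substring searches and four any()-over-present checks with a single positional scan of the lowered text that at each index records which keywords start there into a set, recommendations then filtered from groups disjoint from that set.
import Mathlib
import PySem

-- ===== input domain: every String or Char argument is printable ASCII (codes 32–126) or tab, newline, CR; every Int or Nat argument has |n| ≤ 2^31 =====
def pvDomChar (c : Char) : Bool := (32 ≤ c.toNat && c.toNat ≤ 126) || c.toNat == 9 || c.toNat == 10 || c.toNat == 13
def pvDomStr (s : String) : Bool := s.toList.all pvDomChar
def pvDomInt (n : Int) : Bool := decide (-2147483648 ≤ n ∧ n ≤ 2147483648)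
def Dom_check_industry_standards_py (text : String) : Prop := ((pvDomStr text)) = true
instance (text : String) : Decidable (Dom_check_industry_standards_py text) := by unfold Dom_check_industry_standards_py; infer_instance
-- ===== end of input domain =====

-- B replaces the per-keyword substring searches and the four any()-over-present
-- checks by a single positional scan of the lowered text collecting matched
-- keywords into a set, with recommendations filtered from groups disjoint from
-- that set (objective: alternative).

-- ===== PORT A =====
def check_industry_standards_py (text : String) : List String × List String :=
  let known : List String :=
    ["OWASP", "ASVS", "ISO 27001", "SOC 2", "SOC2", "GDPR", "HIPAA", "PCI", "PCI-DSS", "NIST", "CIS"]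
  let present : List String :=
    known.foldl (fun acc k =>
      if PySem.Str.isIn (PySem.Str.lower k) (PySem.Str.lower text) then acc ++ [k] else acc) []
  let recommendations : List String := []
  let recommendations :=
    if !(["OWASP", "ASVS"].any (fun s => present.contains s)) then
      recommendations ++ ["OWASP ASVS"] else recommendations
  let recommendations :=
    if !(["ISO 27001", "SOC 2", "SOC2"].any (fun s => present.contains s)) then
      recommendations ++ ["ISO 27001 or SOC 2"] else recommendations
  let recommendations :=
    if !(["GDPR", "HIPAA", "PCI", "PCI-DSS"].any (fun s => present.contains s)) then
      recommendations ++ ["GDPR/HIPAA/PCI (as applicable)"] else recommendations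
  let recommendations :=
    if !(["NIST", "CIS"].any (fun s => present.contains s)) then
      recommendations ++ ["NIST or CIS Benchmarks"] else recommendations
  (PySem.List.sorted (PySem.Set.ofList present) (fun x => x) false, recommendations)

-- ===== PORT B =====
def check_industry_standards_py_alt (text : String) : List String × List String :=
  let groups : List (List String × String) :=
    [(["OWASP", "ASVS"], "OWASP ASVS"),
     (["ISO 27001", "SOC 2", "SOC2"], "ISO 27001 or SOC 2"),
     (["GDPR", "HIPAA", "PCI", "PCI-DSS"], "GDPR/HIPAA/PCI (as applicable)"),
     (["NIST", "CIS"], "NIST or CIS Benchmarks")]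
  let pats : List (List Char × String) :=
    groups.flatMap (fun g => g.1.map (fun k => ((PySem.Str.lower k).toList, k)))
  let t : List Char := (PySem.Str.lower text).toList
  let found : PySem.Set String :=
    (PySem.List.pyRange 0 (t.length : Int) 1).foldl (fun fd i =>
      pats.foldl (fun fd p =>
        -- t.startswith(low, i) with 0 ≤ i < len(t): prefix test at position i
        if !(PySem.Set.contains fd p.2) && PySem.Chars.startswith (t.drop i.toNat) p.1
        then PySem.Set.add fd p.2 else fd) fd) PySem.Set.empty
  let recs : List String :=
    (groups.filter (fun g => (PySem.Set.inter found (PySem.Set.ofList g.1)).isEmpty)).map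
      (fun g => g.2)
  (PySem.List.sorted found (fun x => x) false, recs)

-- ===== PRECONDITION & SPEC =====
def Spec_check_industry_standards_py (text : String) (out : List String × List String) : Prop := out = check_industry_standards_py_alt text
instance (text : String) (out : List String × List String) : Decidable (Spec_check_industry_standards_py text out) := by unfold Spec_check_industry_standards_py; infer_instance

-- ===== CLAIM (what is proved, stated in full; the proofs are below) =====
def Claim_equal_check_industry_standards_py : Prop := ∀ (text : String), Dom_check_industry_standards_py text → Spec_check_industry_standards_py text (check_industry_standards_py text)

-- ===== LEMMAS AND PROOFS =====

-- B's inner fold over the pattern table: nodup is preserved and membership is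
-- "already there, or some pattern with a true test projects to it".
theorem inner_foldl_spec (l : List (List Char × String)) (c : List Char → Bool)
    (s : PySem.Set String) (hnd : s.Nodup) :
    (l.foldl (fun fd p =>
        if !(PySem.Set.contains fd p.2) && c p.1 then PySem.Set.add fd p.2 else fd) s).Nodup ∧
    ∀ x, x ∈ (l.foldl (fun fd p =>
        if !(PySem.Set.contains fd p.2) && c p.1 then PySem.Set.add fd p.2 else fd) s) ↔
      x ∈ s ∨ ∃ p ∈ l, c p.1 ∧ p.2 = x := by
  induction l generalizing s with
  | nil => simp [hnd]
  | cons a tl ih =>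
    simp only [List.foldl_cons]
    by_cases hc : (!(PySem.Set.contains s a.2) && c a.1) = true
    · obtain ⟨hnd', hmem'⟩ := ih (PySem.Set.add s a.2) (PySem.Set.nodup_add s a.2 hnd)
      refine ⟨by rw [if_pos hc]; exact hnd', fun x => ?_⟩
      rw [if_pos hc, hmem' x, PySem.Set.mem_add]
      simp only [Bool.and_eq_true, Bool.not_eq_true'] at hc
      constructor
      · rintro (⟨h | h⟩ | ⟨p, hp, hcp, hpx⟩)
        · exact Or.inl h
        · exact Or.inr ⟨a, by simp, hc.2, h.symm⟩
        · exact Or.inr ⟨p, by simp [hp], hcp, hpx⟩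
      · rintro (h | ⟨p, hp, hcp, hpx⟩)
        · exact Or.inl (Or.inl h)
        · rcases List.mem_cons.1 hp with rfl | hp'
          · exact Or.inl (Or.inr hpx.symm)
          · exact Or.inr ⟨p, hp', hcp, hpx⟩
    · obtain ⟨hnd', hmem'⟩ := ih s hnd
      refine ⟨by rw [if_neg hc]; exact hnd', fun x => ?_⟩
      rw [if_neg hc, hmem' x]
      simp only [Bool.and_eq_true, Bool.not_eq_true', not_and_or, Bool.not_eq_false] at hc
      constructor
      · rintro (h | ⟨p, hp, hcp, hpx⟩)
        · exact Or.inl h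
        · exact Or.inr ⟨p, by simp [hp], hcp, hpx⟩
      · rintro (h | ⟨p, hp, hcp, hpx⟩)
        · exact Or.inl h
        · rcases List.mem_cons.1 hp with rfl | hp'
          · rcases hc with hin | hcf
            · subst hpx
              exact Or.inl (by simpa [PySem.Set.contains, List.contains_eq_mem] using hin)
            · exact absurd hcp (by simp [hcf])
          · exact Or.inr ⟨p, hp', hcp, hpx⟩

-- B's outer fold over the positions: nodup and membership characterisation.
theorem outer_foldl_spec (pats : List (List Char × String)) (t : List Char)
    (il : List Int) (s : PySem.Set String) (hnd : s.Nodup) :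
    (il.foldl (fun fd i =>
        pats.foldl (fun fd p =>
          if !(PySem.Set.contains fd p.2) && PySem.Chars.startswith (t.drop i.toNat) p.1
          then PySem.Set.add fd p.2 else fd) fd) s).Nodup ∧
    ∀ x, x ∈ (il.foldl (fun fd i =>
        pats.foldl (fun fd p =>
          if !(PySem.Set.contains fd p.2) && PySem.Chars.startswith (t.drop i.toNat) p.1
          then PySem.Set.add fd p.2 else fd) fd) s) ↔
      x ∈ s ∨ ∃ i ∈ il, ∃ p ∈ pats, PySem.Chars.startswith (t.drop i.toNat) p.1 ∧ p.2 = x := by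
  induction il generalizing s with
  | nil => simp [hnd]
  | cons i tl ih =>
    simp only [List.foldl_cons]
    obtain ⟨hnd1, hmem1⟩ :=
      inner_foldl_spec pats (fun lw => PySem.Chars.startswith (t.drop i.toNat) lw) s hnd
    obtain ⟨hnd2, hmem2⟩ := ih _ hnd1
    refine ⟨hnd2, fun x => ?_⟩
    rw [hmem2 x, hmem1 x]
    constructor
    · rintro ((h | ⟨p, hp, hc, hpx⟩) | ⟨j, hj, p, hp, hc, hpx⟩)
      · exact Or.inl h
      · exact Or.inr ⟨i, by simp, p, hp, hc, hpx⟩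
      · exact Or.inr ⟨j, by simp [hj], p, hp, hc, hpx⟩
    · rintro (h | ⟨j, hj, p, hp, hc, hpx⟩)
      · exact Or.inl (Or.inl h)
      · rcases List.mem_cons.1 hj with rfl | hj'
        · exact Or.inl (Or.inr ⟨p, hp, hc, hpx⟩)
        · exact Or.inr ⟨j, hj', p, hp, hc, hpx⟩

-- A position-bounded prefix match somewhere in t is exactly a substring hit,
-- for a nonempty pattern.
theorem exists_pos_startswith_iff (low t : List Char) (hne : low ≠ []) :
    (∃ i ∈ PySem.List.pyRange 0 (t.length : Int) 1,
        PySem.Chars.startswith (t.drop i.toNat) low = true) ↔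
      PySem.Chars.isIn low t = true := by
  rw [← PySem.Chars.exists_prefix_drop_iff_isIn]
  constructor
  · rintro ⟨i, _, hs⟩
    exact ⟨i.toNat, (PySem.Chars.startswith_iff _ _).1 hs⟩
  · rintro ⟨j, hpre⟩
    have hjlt : j < t.length := by
      by_contra hge
      rw [List.drop_eq_nil_of_le (by omega)] at hpre
      exact hne (List.prefix_nil.mp hpre)
    refine ⟨(j : Int), PySem.List.mem_pyRange_one.2 (by omega), ?_⟩
    rw [PySem.Chars.startswith_iff]
    simpa using hpre

theorem scan_iff_isIn (t : List Char) (pats : List (List Char × String))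
    (hne : ∀ p ∈ pats, p.1 ≠ []) (x : String) :
    (∃ i ∈ PySem.List.pyRange 0 (t.length : Int) 1, ∃ p ∈ pats,
        PySem.Chars.startswith (t.drop i.toNat) p.1 = true ∧ p.2 = x) ↔
      ∃ p ∈ pats, PySem.Chars.isIn p.1 t = true ∧ p.2 = x := by
  constructor
  · rintro ⟨i, hi, p, hp, hs, hpx⟩
    exact ⟨p, hp, (exists_pos_startswith_iff p.1 t (hne p hp)).1 ⟨i, hi, hs⟩, hpx⟩
  · rintro ⟨p, hp, hin, hpx⟩
    obtain ⟨i, hi, hs⟩ := (exists_pos_startswith_iff p.1 t (hne p hp)).2 hin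
    exact ⟨i, hi, p, hp, hs, hpx⟩

theorem cond_eq (found present g : List String)
    (hx : ∀ x, x ∈ found ↔ x ∈ present) :
    (!(g.any fun s => present.contains s)) =
      (PySem.Set.inter found (PySem.Set.ofList g)).isEmpty := by
  by_cases h : ∃ s ∈ g, s ∈ present
  · obtain ⟨s, hsg, hsp⟩ := h
    have h1 : (g.any fun s => present.contains s) = true :=
      List.any_eq_true.2 ⟨s, hsg, by simpa [List.contains_eq_mem] using hsp⟩
    have h2 : (PySem.Set.inter found (PySem.Set.ofList g)) ≠ [] := by
      intro heq
      have hmem : s ∈ PySem.Set.inter found (PySem.Set.ofList g) := by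
        simp only [PySem.Set.inter, List.mem_filter]
        exact ⟨(hx s).2 hsp, by
          simp [PySem.Set.contains, List.contains_eq_mem, PySem.Set.mem_ofList, hsg]⟩
      simp [heq] at hmem
    rw [h1]
    simp [h2]
  · have h1 : (g.any fun s => present.contains s) = false := by
      simp only [List.any_eq_false]
      intro s hs
      simp only [List.contains_eq_mem, decide_eq_true_eq]
      exact fun hsp => h ⟨s, hs, hsp⟩
    have h2 : (PySem.Set.inter found (PySem.Set.ofList g)).isEmpty = true := by
      simp only [List.isEmpty_iff, PySem.Set.inter, List.filter_eq_nil_iff]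
      intro s hsf
      simp only [PySem.Set.contains, List.contains_eq_mem, decide_eq_true_eq, PySem.Set.mem_ofList]
      exact fun hsg => h ⟨s, hsg, (hx s).1 hsf⟩
    rw [h1, h2]
    rfl
set_option maxHeartbeats 2000000 in
theorem check_industry_standards_py_eq (text : String) :
    check_industry_standards_py text = check_industry_standards_py_alt text := by
  simp only [check_industry_standards_py, check_industry_standards_py_alt]
  rw [PySem.List.foldl_append_if (fun k => PySem.Str.isIn (PySem.Str.lower k) (PySem.Str.lower text)) (fun k => k)]
  simp only [List.map_id', List.nil_append]
  have hpats : (([(["OWASP", "ASVS"], "OWASP ASVS"),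
       (["ISO 27001", "SOC 2", "SOC2"], "ISO 27001 or SOC 2"),
       (["GDPR", "HIPAA", "PCI", "PCI-DSS"], "GDPR/HIPAA/PCI (as applicable)"),
       (["NIST", "CIS"], "NIST or CIS Benchmarks")] : List (List String × String)).flatMap
         (fun g => g.1.map (fun k => ((PySem.Str.lower k).toList, k)))) =
      (["OWASP", "ASVS", "ISO 27001", "SOC 2", "SOC2", "GDPR", "HIPAA", "PCI", "PCI-DSS",
        "NIST", "CIS"] : List String).map (fun k => ((PySem.Str.lower k).toList, k)) := by
    decide
  rw [hpats]
  set known : List String :=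
    ["OWASP", "ASVS", "ISO 27001", "SOC 2", "SOC2", "GDPR", "HIPAA", "PCI", "PCI-DSS", "NIST", "CIS"] with hknown
  set present : List String :=
    known.filter (fun k => PySem.Str.isIn (PySem.Str.lower k) (PySem.Str.lower text)) with hpresent
  set t : List Char := (PySem.Str.lower text).toList with ht
  obtain ⟨hnd, hmem⟩ := outer_foldl_spec (known.map (fun k => ((PySem.Str.lower k).toList, k))) t
      (PySem.List.pyRange 0 (t.length : Int) 1) PySem.Set.empty List.nodup_nil
  set found := (PySem.List.pyRange 0 (t.length : Int) 1).foldl (fun fd i =>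
      (known.map (fun k => ((PySem.Str.lower k).toList, k))).foldl (fun fd p =>
        if !(PySem.Set.contains fd p.2) && PySem.Chars.startswith (t.drop i.toNat) p.1
        then PySem.Set.add fd p.2 else fd) fd) PySem.Set.empty with hfound
  have hx : ∀ x, x ∈ found ↔ x ∈ present := by
    intro x
    rw [hmem x]
    have hne : ∀ p ∈ known.map (fun k => ((PySem.Str.lower k).toList, k)), p.1 ≠ [] := by decide
    rw [show (x ∈ PySem.Set.empty ∨ ∃ i ∈ PySem.List.pyRange 0 (t.length : Int) 1,
          ∃ p ∈ known.map (fun k => ((PySem.Str.lower k).toList, k)),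
            PySem.Chars.startswith (t.drop i.toNat) p.1 = true ∧ p.2 = x) ↔
        (∃ i ∈ PySem.List.pyRange 0 (t.length : Int) 1,
          ∃ p ∈ known.map (fun k => ((PySem.Str.lower k).toList, k)),
            PySem.Chars.startswith (t.drop i.toNat) p.1 = true ∧ p.2 = x) from by
      simp [PySem.Set.empty]]
    rw [scan_iff_isIn t _ hne x]
    simp only [List.mem_map, hpresent, List.mem_filter]
    constructor
    · rintro ⟨p, ⟨k, hk, rfl⟩, hin, hpx⟩
      subst hpx
      refine ⟨hk, ?_⟩
      simpa [ht] using hin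
    · rintro ⟨hk, hP⟩
      exact ⟨((PySem.Str.lower x).toList, x), ⟨x, hk, rfl⟩, by simpa [ht] using hP, rfl⟩
  refine Prod.ext ?_ ?_
  · show PySem.List.sorted (PySem.Set.ofList present) (fun x => x) false =
      PySem.List.sorted found (fun x => x) false
    rw [PySem.List.sorted_id_eq_sorted_id_iff_perm]
    rw [List.perm_ext_iff_of_nodup (PySem.Set.nodup_ofList present) hnd]
    intro a
    rw [PySem.Set.mem_ofList]
    exact (hx a).symm
  · show _ = _
    rw [cond_eq found present ["OWASP", "ASVS"] hx,
        cond_eq found present ["ISO 27001", "SOC 2", "SOC2"] hx,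
        cond_eq found present ["GDPR", "HIPAA", "PCI", "PCI-DSS"] hx,
        cond_eq found present ["NIST", "CIS"] hx]
    by_cases h1 : (PySem.Set.inter found (PySem.Set.ofList ["OWASP", "ASVS"])).isEmpty = true <;>
      by_cases h2 : (PySem.Set.inter found (PySem.Set.ofList ["ISO 27001", "SOC 2", "SOC2"])).isEmpty = true <;>
        by_cases h3 : (PySem.Set.inter found (PySem.Set.ofList ["GDPR", "HIPAA", "PCI", "PCI-DSS"])).isEmpty = true <;>
          by_cases h4 : (PySem.Set.inter found (PySem.Set.ofList ["NIST", "CIS"])).isEmpty = true <;>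
            simp [h1, h2, h3, h4, List.filter_nil]

-- ===== VERDICT (by name: the statement is the Claim_ definition above) =====
theorem check_industry_standards_py_spec : Claim_equal_check_industry_standards_py := by
  intro text _
  show check_industry_standards_py text = check_industry_standards_py_alt text
  exact check_industry_standards_py_eq text
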